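-- pv_equiv track=rewrite | github.com/dev2points/Minmum-Span-Frequency-Assignment-Problem | philadelphia/one_vertex.py | create_frequency_var
-- ===== SOURCE A (Python) =====
-- def create_frequency_var(num_cells, UB):
--     x = [[0] * (UB + 1) for _ in range(num_cells + 1)]
--     top = 0
--     for i in range(1, num_cells + 1):
--         for j in range(1, UB + 1):
--             top += 1
--             x[i][j] = top
--
--     return x, top
-- ===== SOURCE B (Python) =====
-- def create_frequency_var(num_cells, UB):
--     rows = range(1, num_cells + 1)
--     cols = range(1, UB + 1)
--     x = [[0] * (UB + 1) for _ in range(num_cells + 1)]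
--     for i in rows:
--         x[i][1:] = [(i - 1) * UB + j for j in cols]
--     return x, len(rows) * len(cols)
-- ===== Notes on version B (the rewrite author's own statement) =====
-- stated objective: simpler
-- what changed: Replaced the running counter mutated cell-by-cell in nested loops by whole-row slice assignments from the closed-form value (i-1)*UB+j, and the returned count by len(rows)*len(cols).
import Mathlib
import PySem

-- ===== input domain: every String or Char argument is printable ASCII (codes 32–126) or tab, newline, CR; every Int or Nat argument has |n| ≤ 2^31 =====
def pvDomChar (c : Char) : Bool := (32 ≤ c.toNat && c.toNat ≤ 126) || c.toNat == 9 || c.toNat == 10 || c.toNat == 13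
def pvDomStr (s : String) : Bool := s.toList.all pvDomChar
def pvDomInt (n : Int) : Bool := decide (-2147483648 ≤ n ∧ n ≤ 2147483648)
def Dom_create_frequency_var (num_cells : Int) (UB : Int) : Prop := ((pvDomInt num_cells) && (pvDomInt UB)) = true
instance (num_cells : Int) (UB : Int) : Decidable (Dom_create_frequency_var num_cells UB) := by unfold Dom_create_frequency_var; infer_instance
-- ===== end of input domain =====

-- B replaces A's running counter mutated cell-by-cell inside nested loops by whole-row
-- assignments of the closed-form values and a rows*cols product for the count (objective: simpler).

-- ===== PORT A =====
-- Transliteration of A: build the zero grid, then mutate x[i][j] := top inside nested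
-- loops over range(1, num_cells+1) × range(1, UB+1).  The indices i, j are always in
-- range for the list being updated, so pyGetD/pySetD are exact here.
def create_frequency_var (num_cells : Int) (UB : Int) : List (List Int) × Int :=
  let x : List (List Int) :=
    (PySem.List.pyRange 0 (num_cells + 1) 1).map (fun _ => PySem.List.pyRepeat [(0 : Int)] (UB + 1))
  (PySem.List.pyRange 1 (num_cells + 1) 1).foldl
    (fun (st : List (List Int) × Int) i =>
      (PySem.List.pyRange 1 (UB + 1) 1).foldl
        (fun (st : List (List Int) × Int) j =>
          let top := st.2 + 1
          (PySem.List.pySetD st.1 i (PySem.List.pySetD (PySem.List.pyGetD st.1 i []) j top), top))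
        st)
    (x, 0)

-- ===== PORT B =====
-- Transliteration of B: fill each row's tail at once by slice assignment
-- (x[i][1:] = L is row := row[:1] ++ L, exact here), count = len(rows)*len(cols).
def create_frequency_var_alt (num_cells : Int) (UB : Int) : List (List Int) × Int :=
  let rows := PySem.List.pyRange 1 (num_cells + 1) 1
  let cols := PySem.List.pyRange 1 (UB + 1) 1
  let x0 : List (List Int) :=
    (PySem.List.pyRange 0 (num_cells + 1) 1).map (fun _ => PySem.List.pyRepeat [(0 : Int)] (UB + 1))
  let x := rows.foldl
    (fun (x : List (List Int)) i =>
      PySem.List.pySetD x i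
        ((PySem.List.pyGetD x i []).take 1 ++ cols.map (fun j => (i - 1) * UB + j)))
    x0
  (x, ((rows.length * cols.length : Nat) : Int))

-- ===== PRECONDITION & SPEC =====
def Spec_create_frequency_var (num_cells : Int) (UB : Int) (out : List (List Int) × Int) : Prop := out = create_frequency_var_alt num_cells UB
instance (num_cells : Int) (UB : Int) (out : List (List Int) × Int) : Decidable (Spec_create_frequency_var num_cells UB out) := by unfold Spec_create_frequency_var; infer_instance

-- ===== CLAIM (what is proved, stated in full; the proofs are below) =====
def Claim_equal_create_frequency_var : Prop := ∀ (num_cells : Int) (UB : Int), Dom_create_frequency_var num_cells UB → Spec_create_frequency_var num_cells UB (create_frequency_var num_cells UB)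

-- ===== LEMMAS AND PROOFS =====

-- the all-zero row [0]*(UB+1)
def pvZrow (UB : Int) : List Int := PySem.List.pyRepeat [(0 : Int)] (UB + 1)

-- the closed-form row for outer index i
def pvRowB (UB i : Int) : List Int :=
  (PySem.List.pyRange 0 (UB + 1) 1).map (fun j => if 1 ≤ i ∧ 1 ≤ j then (i - 1) * UB + j else 0)

-- A's inner-loop body, lifted to the row it mutates
def pvStepR (p : List Int × Int) (j : Int) : List Int × Int :=
  (PySem.List.pySetD p.1 j (p.2 + 1), p.2 + 1)

-- A's inner loop as a whole (the outer-loop body), acting on (x, top) at row index i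
def pvStepX (UB : Int) (st : List (List Int) × Int) (i : Int) : List (List Int) × Int :=
  (PySem.List.pyRange 1 (UB + 1) 1).foldl
    (fun (st : List (List Int) × Int) j =>
      let top := st.2 + 1
      (PySem.List.pySetD st.1 i (PySem.List.pySetD (PySem.List.pyGetD st.1 i []) j top), top))
    st

-- B's loop body
def pvStepB (_num_cells UB : Int) (x : List (List Int)) (i : Int) : List (List Int) :=
  PySem.List.pySetD x i
    ((PySem.List.pyGetD x i []).take 1 ++
      (PySem.List.pyRange 1 (UB + 1) 1).map (fun j => (i - 1) * UB + j))

-- closed form of the row after the inner loop filled columns 1..c starting from counter t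
def pvFillRow (r : List Int) (t : Int) (c : Nat) : List Int :=
  (List.range r.length).map (fun k =>
    if 1 ≤ k ∧ k ≤ c then t + (k : Int) else PySem.List.pyGetD r (k : Int) 0)

-- the grid after the outer indices 1..k have been processed
def pvPartialGrid (num_cells UB : Int) (k : Nat) : List (List Int) :=
  (PySem.List.pyRange 0 (num_cells + 1) 1).map
    (fun i => if i ≤ (k : Int) then pvRowB UB i else pvZrow UB)

theorem pvZrow_eq (c : Int) (f : Int → Int) (h : ∀ j, 0 ≤ j → j < c → f j = 0) :
    (PySem.List.pyRange 0 c 1).map f = PySem.List.pyRepeat [(0 : Int)] c := by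
  rw [PySem.List.pyRepeat_singleton, List.eq_replicate_iff]
  constructor
  · simp [PySem.List.length_pyRange_one]
  · intro b hb
    rcases List.mem_map.mp hb with ⟨j, hj, rfl⟩
    rcases (PySem.List.mem_pyRange_one).mp hj with ⟨h0, h1⟩
    exact h j h0 h1

theorem pvFillRow_zero (r : List Int) (t : Int) : pvFillRow r t 0 = r := by
  unfold pvFillRow
  apply List.ext_getElem
  · simp
  · intro k h1 h2
    simp only [List.getElem_map, List.getElem_range]
    rw [if_neg (by omega)]
    simp [PySem.List.pyGetD_natCast, List.length_range] at h1 ⊢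
    simp [h1]

theorem pvRow_fold (c : Nat) (r : List Int) (t : Int) (hr : c < r.length) :
    (PySem.List.pyRange 1 ((c : Int) + 1) 1).foldl pvStepR (r, t)
      = (pvFillRow r t c, t + c) := by
  induction c generalizing t with
  | zero =>
    rw [PySem.List.pyRange_one_eq_nil (by omega)]
    simp [pvFillRow_zero]
  | succ c ih =>
    have h1 : (1 : Int) ≤ (c : Int) + 1 := by omega
    rw [show ((c : Nat).succ : Int) + 1 = ((c : Int) + 1) + 1 by push_cast; ring,
        PySem.List.pyRange_one_succ_right h1, List.foldl_append, ih t (by omega)]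
    simp only [List.foldl_cons, List.foldl_nil, pvStepR]
    rw [Prod.mk.injEq]
    refine ⟨?_, ?_⟩
    · rw [show ((c : Int) + 1) = ((c + 1 : Nat) : Int) by push_cast; ring,
          PySem.List.pySetD_natCast]
      apply List.ext_getElem
      · simp [pvFillRow]
      · intro p hp1 hp2
        have hlen : ((c : Int) + 1).toNat = c + 1 := by omega
        have hplen : p < r.length := by simpa [pvFillRow] using hp1
        by_cases hpc : p = c + 1
        · subst hpc
          rw [List.getElem_set_self (by simpa [pvFillRow] using hr)]
          simp only [pvFillRow, List.getElem_map, List.getElem_range]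
          rw [if_pos (by omega)]
          push_cast; ring
        · rw [List.getElem_set_ne (by omega)]
          simp only [pvFillRow, List.getElem_map, List.getElem_range]
          by_cases hle : 1 ≤ p ∧ p ≤ c
          · rw [if_pos hle, if_pos (by omega)]
          · rw [if_neg hle, if_neg (by omega)]
    · push_cast; ring

-- lift the inner loop from rows to the whole grid, at any valid row index
theorem pvInner_lift (js : List Int) (x : List (List Int)) (i : Nat) (hi : i < x.length)
    (r : List Int) (t : Int) :
    js.foldl
      (fun (st : List (List Int) × Int) j =>
        let top := st.2 + 1
        (PySem.List.pySetD st.1 (i : Int) (PySem.List.pySetD (PySem.List.pyGetD st.1 (i : Int) []) j top), top))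
      (x.set i r, t)
      = ((x.set i (js.foldl pvStepR (r, t)).1), (js.foldl pvStepR (r, t)).2) := by
  induction js generalizing r t with
  | nil => simp
  | cons j js ih =>
    simp only [List.foldl_cons]
    have hget : PySem.List.pyGetD (x.set i r) (i : Int) [] = r := by
      rw [PySem.List.pyGetD_natCast]
      simp [List.getD, hi]
    rw [hget]
    have hset : PySem.List.pySetD (x.set i r) (i : Int) (PySem.List.pySetD r j (t + 1))
        = x.set i (PySem.List.pySetD r j (t + 1)) := by
      rw [PySem.List.pySetD_natCast, List.set_set]
    simp only [hset]
    exact ih _ _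

theorem pvA_eq (n UB : Int) :
    create_frequency_var n UB
      = (PySem.List.pyRange 1 (n + 1) 1).foldl (pvStepX UB)
          ((PySem.List.pyRange 0 (n + 1) 1).map (fun _ => pvZrow UB), 0) := rfl

theorem pvB_eq (n UB : Int) :
    create_frequency_var_alt n UB
      = ((PySem.List.pyRange 1 (n + 1) 1).foldl (pvStepB n UB)
           ((PySem.List.pyRange 0 (n + 1) 1).map (fun _ => pvZrow UB)),
         (((PySem.List.pyRange 1 (n + 1) 1).length * (PySem.List.pyRange 1 (UB + 1) 1).length : Nat) : Int)) := rfl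

theorem pvRowB_zero (UB i : Int) (hi : ¬ 1 ≤ i) : pvRowB UB i = pvZrow UB := by
  unfold pvRowB pvZrow
  apply pvZrow_eq
  intro j _ _
  rw [if_neg (by tauto)]

theorem pvStepX_id (UB : Int) (hUB : UB ≤ 0) (st : List (List Int) × Int) (i : Int) :
    pvStepX UB st i = st := by
  unfold pvStepX
  rw [PySem.List.pyRange_one_eq_nil (by omega)]
  rfl

theorem pvZrow_length (UB : Int) : (pvZrow UB).length = (UB + 1).toNat := by
  simp [pvZrow, PySem.List.pyRepeat_singleton]

theorem pvZrow_getD (UB : Int) (q : Nat) (hq : q < (UB + 1).toNat) :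
    PySem.List.pyGetD (pvZrow UB) (q : Int) 0 = 0 := by
  rw [PySem.List.pyGetD_natCast]
  simp [pvZrow, PySem.List.pyRepeat_singleton, List.getD, hq]

theorem pvFill_eq_rowB (UB : Int) (hUB : 1 ≤ UB) (i : Int) (hi : 1 ≤ i) :
    pvFillRow (pvZrow UB) ((i - 1) * UB) UB.toNat = pvRowB UB i := by
  apply List.ext_getElem
  · simp [pvFillRow, pvRowB, pvZrow_length, PySem.List.length_pyRange_one]
  · intro q h1 h2
    have hq : (q : Int) ≤ UB := by
      have := h1; simp [pvFillRow, pvZrow_length] at this; omega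
    simp only [pvFillRow, pvRowB, List.getElem_map, List.getElem_range,
               PySem.List.getElem_pyRange_one]
    by_cases h1q : 1 ≤ q
    · rw [if_pos ⟨h1q, by omega⟩, if_pos ⟨hi, by omega⟩]
      ring
    · rw [if_neg (by tauto), if_neg (by omega), pvZrow_getD UB q (by omega)]

-- A's outer loop reaches the partial grid (UB ≥ 1)
theorem pvOuter (n UB : Int) (hUB : 1 ≤ UB) (k : Nat) (hk : (k : Int) ≤ n) :
    (PySem.List.pyRange 1 ((k : Int) + 1) 1).foldl (pvStepX UB)
        ((PySem.List.pyRange 0 (n + 1) 1).map (fun _ => pvZrow UB), 0)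
      = (pvPartialGrid n UB k, (k : Int) * UB) := by
  induction k with
  | zero =>
    simp only [Nat.cast_zero]
    rw [PySem.List.pyRange_one_eq_nil (a := 1) (b := (0 : Int) + 1) (by omega)]
    simp only [List.foldl_nil, zero_mul]
    rw [Prod.mk.injEq]
    refine ⟨?_, ?_⟩
    · unfold pvPartialGrid
      apply List.map_congr_left
      intro i hi
      rcases (PySem.List.mem_pyRange_one).mp hi with ⟨h0, _⟩
      by_cases h : i ≤ (0 : Int)
      · rw [if_pos (by exact_mod_cast h), pvRowB_zero UB i (by omega)]
      · rw [if_neg (by exact_mod_cast h)]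
    · rfl
  | succ k ih =>
    have h1 : (1 : Int) ≤ (k : Int) + 1 := by omega
    rw [show ((k + 1 : Nat) : Int) + 1 = ((k : Int) + 1) + 1 by push_cast; ring,
        PySem.List.pyRange_one_succ_right h1, List.foldl_append, ih (by push_cast at hk ⊢; omega)]
    simp only [List.foldl_cons, List.foldl_nil]
    have hlenG : (pvPartialGrid n UB k).length = (n + 1).toNat := by
      simp [pvPartialGrid, PySem.List.length_pyRange_one]
    have hkn : (k : Int) + 1 ≤ n := by exact_mod_cast hk
    have hklt : k + 1 < (n + 1).toNat := by omega
    have hrow : (pvPartialGrid n UB k)[k + 1]'(by omega) = pvZrow UB := by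
      simp only [pvPartialGrid, List.getElem_map, PySem.List.getElem_pyRange_one]
      rw [if_neg (by push_cast; omega)]
    have hGset : pvPartialGrid n UB k
        = (pvPartialGrid n UB k).set (k + 1) ((pvPartialGrid n UB k)[k + 1]'(by omega)) := by
      rw [List.set_getElem_self]
    unfold pvStepX
    rw [show ((k : Int) + 1) = ((k + 1 : Nat) : Int) by push_cast; ring]
    conv_lhs => rw [hGset, hrow]
    rw [pvInner_lift _ _ (k + 1) (by omega)]
    have hrange : PySem.List.pyRange 1 (UB + 1) 1
        = PySem.List.pyRange 1 ((UB.toNat : Int) + 1) 1 := by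
      congr 1; omega
    rw [hrange, pvRow_fold UB.toNat (pvZrow UB) ((k : Int) * UB)
          (by rw [pvZrow_length]; omega)]
    rw [Prod.mk.injEq]
    refine ⟨?_, ?_⟩
    · dsimp only
      apply List.ext_getElem
      · simp [pvPartialGrid, PySem.List.length_pyRange_one]
      · intro p hp1 hp2
        have hplen : p < (n + 1).toNat := by
          simpa [pvPartialGrid, PySem.List.length_pyRange_one] using hp2
        by_cases hpk : p = k + 1
        · subst hpk
          rw [List.getElem_set_self (by omega)]
          have : ((k : Int) * UB) = (((k + 1 : Nat) : Int) - 1) * UB := by push_cast; ring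
          rw [this, pvFill_eq_rowB UB hUB _ (by push_cast; omega)]
          simp only [pvPartialGrid, List.getElem_map, PySem.List.getElem_pyRange_one]
          rw [if_pos (by push_cast; omega)]
          norm_num
        · rw [List.getElem_set_ne (by omega)]
          simp only [pvPartialGrid, List.getElem_map, PySem.List.getElem_pyRange_one]
          by_cases hle : (0 : Int) + (p : Int) ≤ (k : Int)
          · rw [if_pos hle, if_pos (by push_cast at hle ⊢; omega)]
          · rw [if_neg hle, if_neg (by push_cast at hle hpk ⊢; omega)]
    · dsimp only
      push_cast
      have : (UB.toNat : Int) = UB := by omega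
      rw [this]; ring

-- B's step is the identity on the zero grid when the column range is empty (UB ≤ 0)
theorem pvStepB_id (n UB : Int) (hUB : UB ≤ 0) (i : Int) (h0 : 1 ≤ i) (h1 : i < n + 1) :
    pvStepB n UB ((PySem.List.pyRange 0 (n + 1) 1).map (fun _ => pvZrow UB)) i
      = (PySem.List.pyRange 0 (n + 1) 1).map (fun _ => pvZrow UB) := by
  unfold pvStepB
  rw [PySem.List.pyRange_one_eq_nil (a := 1) (b := UB + 1) (by omega), List.map_nil,
      List.append_nil]
  rw [show i = ((i.toNat : Nat) : Int) by omega, PySem.List.pyGetD_natCast,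
      PySem.List.pySetD_natCast]
  have hi : i.toNat < ((PySem.List.pyRange 0 (n + 1) 1).map (fun _ => pvZrow UB)).length := by
    simp [PySem.List.length_pyRange_one]; omega
  have hget : ((PySem.List.pyRange 0 (n + 1) 1).map (fun _ => pvZrow UB)).getD i.toNat []
      = pvZrow UB := by
    rw [List.getD, List.getElem?_eq_getElem hi, Option.getD_some, List.getElem_map]
  rw [hget]
  have htake : (pvZrow UB).take 1 = pvZrow UB := by
    apply List.take_of_length_le
    rw [pvZrow_length]; omega
  rw [htake]
  calc ((PySem.List.pyRange 0 (n + 1) 1).map (fun _ => pvZrow UB)).set i.toNat (pvZrow UB)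
      = ((PySem.List.pyRange 0 (n + 1) 1).map (fun _ => pvZrow UB)).set i.toNat
          (((PySem.List.pyRange 0 (n + 1) 1).map (fun _ => pvZrow UB))[i.toNat]'hi) := by
        rw [List.getElem_map]
    _ = (PySem.List.pyRange 0 (n + 1) 1).map (fun _ => pvZrow UB) := List.set_getElem_self hi

-- B's fold reaches the same partial grid (UB ≥ 1)
theorem pvBOuter (n UB : Int) (hUB : 1 ≤ UB) (k : Nat) (hk : (k : Int) ≤ n) :
    (PySem.List.pyRange 1 ((k : Int) + 1) 1).foldl (pvStepB n UB)
        ((PySem.List.pyRange 0 (n + 1) 1).map (fun _ => pvZrow UB))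
      = pvPartialGrid n UB k := by
  induction k with
  | zero =>
    simp only [Nat.cast_zero]
    rw [PySem.List.pyRange_one_eq_nil (a := 1) (b := (0 : Int) + 1) (by omega)]
    simp only [List.foldl_nil]
    unfold pvPartialGrid
    apply List.map_congr_left
    intro i hi
    rcases (PySem.List.mem_pyRange_one).mp hi with ⟨h0, _⟩
    by_cases h : i ≤ (0 : Int)
    · rw [if_pos (by exact_mod_cast h), pvRowB_zero UB i (by omega)]
    · rw [if_neg (by exact_mod_cast h)]
  | succ k ih =>
    have h1 : (1 : Int) ≤ (k : Int) + 1 := by omega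
    rw [show ((k + 1 : Nat) : Int) + 1 = ((k : Int) + 1) + 1 by push_cast; ring,
        PySem.List.pyRange_one_succ_right h1, List.foldl_append, ih (by push_cast at hk ⊢; omega)]
    simp only [List.foldl_cons, List.foldl_nil]
    have hlenG : (pvPartialGrid n UB k).length = (n + 1).toNat := by
      simp [pvPartialGrid, PySem.List.length_pyRange_one]
    have hkn : (k : Int) + 1 ≤ n := by exact_mod_cast hk
    have hklt : k + 1 < (n + 1).toNat := by omega
    have hrow : (pvPartialGrid n UB k)[k + 1]'(by omega) = pvZrow UB := by
      simp only [pvPartialGrid, List.getElem_map, PySem.List.getElem_pyRange_one]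
      rw [if_neg (by push_cast; omega)]
    unfold pvStepB
    rw [show ((k : Int) + 1) = ((k + 1 : Nat) : Int) by push_cast; ring]
    rw [PySem.List.pyGetD_natCast]
    have hget : (pvPartialGrid n UB k).getD (k + 1) [] = pvZrow UB := by
      rw [List.getD, List.getElem?_eq_getElem (by omega), Option.getD_some, hrow]
    rw [hget, PySem.List.pySetD_natCast]
    have htake : (pvZrow UB).take 1 = [0] := by
      have : pvZrow UB = (0 : Int) :: List.replicate UB.toNat 0 := by
        rw [pvZrow, PySem.List.pyRepeat_singleton,
            show (UB + 1).toNat = UB.toNat + 1 by omega, List.replicate_succ]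
      rw [this, List.take_succ_cons, List.take_zero]
    rw [htake]
    have hnewrow : pvRowB UB ((k + 1 : Nat) : Int)
        = (0 : Int) :: (PySem.List.pyRange 1 (UB + 1) 1).map
            (fun j => (((k + 1 : Nat) : Int) - 1) * UB + j) := by
      unfold pvRowB
      rw [PySem.List.pyRange_one_cons (show (0 : Int) < UB + 1 by omega), List.map_cons,
          if_neg (by omega)]
      rw [show (0 : Int) + 1 = 1 from rfl]
      congr 1
      apply List.map_congr_left
      intro j hj
      rcases (PySem.List.mem_pyRange_one).mp hj with ⟨hj0, _⟩
      rw [if_pos ⟨by push_cast; omega, hj0⟩]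
    rw [show ([(0 : Int)] ++ (PySem.List.pyRange 1 (UB + 1) 1).map
          (fun j => (((k + 1 : Nat) : Int) - 1) * UB + j))
        = (0 : Int) :: (PySem.List.pyRange 1 (UB + 1) 1).map
          (fun j => (((k + 1 : Nat) : Int) - 1) * UB + j) from rfl, ← hnewrow]
    apply List.ext_getElem
    · simp [pvPartialGrid, PySem.List.length_pyRange_one]
    · intro p hp1 hp2
      have hplen : p < (n + 1).toNat := by
        simpa [pvPartialGrid, PySem.List.length_pyRange_one] using hp2
      by_cases hpk : p = k + 1
      · subst hpk
        rw [List.getElem_set_self (by omega)]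
        simp only [pvPartialGrid, List.getElem_map, PySem.List.getElem_pyRange_one]
        rw [if_pos (by push_cast; omega)]
        norm_num
      · rw [List.getElem_set_ne (by omega)]
        simp only [pvPartialGrid, List.getElem_map, PySem.List.getElem_pyRange_one]
        by_cases hle : (0 : Int) + (p : Int) ≤ (k : Int)
        · rw [if_pos hle, if_pos (by push_cast at hle ⊢; omega)]
        · rw [if_neg hle, if_neg (by push_cast at hle hpk ⊢; omega)]

-- ===== VERDICT (by name: the statement is the Claim_ definition above) =====
theorem create_frequency_var_spec : Claim_equal_create_frequency_var := by
  unfold Claim_equal_create_frequency_var Spec_create_frequency_var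
  intro n UB _
  rw [pvA_eq, pvB_eq]
  by_cases hUB : UB ≤ 0
  · -- column range empty: both folds leave the zero grid untouched, count is 0
    have hidA : ∀ (l : List Int) (st : List (List Int) × Int),
        l.foldl (pvStepX UB) st = st := by
      intro l
      induction l with
      | nil => intro st; rfl
      | cons a l ih => intro st; rw [List.foldl_cons, pvStepX_id UB hUB]; exact ih st
    have hidB : ∀ (l : List Int), (∀ i ∈ l, 1 ≤ i ∧ i < n + 1) →
        l.foldl (pvStepB n UB) ((PySem.List.pyRange 0 (n + 1) 1).map (fun _ => pvZrow UB))
          = (PySem.List.pyRange 0 (n + 1) 1).map (fun _ => pvZrow UB) := by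
      intro l
      induction l with
      | nil => intro _; rfl
      | cons a l ih =>
        intro h
        rw [List.foldl_cons, pvStepB_id n UB hUB a (h a (by simp)).1 (h a (by simp)).2]
        exact ih (fun i hi => h i (by simp [hi]))
    rw [hidA, hidB _ (fun i hi => (PySem.List.mem_pyRange_one).mp hi)]
    rw [Prod.mk.injEq]
    refine ⟨rfl, ?_⟩
    rw [PySem.List.pyRange_one_eq_nil (a := 1) (b := UB + 1) (by omega)]
    simp
  · rw [not_le] at hUB
    by_cases hn : n ≤ 0
    · rw [PySem.List.pyRange_one_eq_nil (a := 1) (b := n + 1) (by omega), List.foldl_nil,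
          List.foldl_nil]
      simp
    · rw [not_le] at hn
      have hrange : PySem.List.pyRange 1 (n + 1) 1
          = PySem.List.pyRange 1 ((n.toNat : Int) + 1) 1 := by congr 1; omega
      rw [hrange, pvOuter n UB hUB n.toNat (by omega), pvBOuter n UB hUB n.toNat (by omega)]
      rw [Prod.mk.injEq]
      refine ⟨rfl, ?_⟩
      rw [← hrange]
      simp only [PySem.List.length_pyRange_one]
      push_cast
      have h1 : ((n + 1 - 1).toNat : Int) = n := by omega
      have h2 : ((UB + 1 - 1).toNat : Int) = UB := by omega
      rw [h1, h2]
      have : (n.toNat : Int) = n := by omega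
      rw [this]
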